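-- pv_equiv track=rewrite | github.com/Mr-Keks/university_projects | 2 degree/python/lab1/task1.py | zn
-- ===== SOURCE A (Python) =====
-- def zn(s):
-- 	l = len(s)
-- 	res = ""
-- 	chek = 0
-- 	for i in s:
-- 		if i == '.':
-- 			continue
-- 		if i != '0':
-- 			chek = 1
-- 		if chek == 1:
-- 			res+=i
-- 	return res
-- ===== SOURCE B (Python) =====
-- def zn(s):
-- 	return s.replace('.', '').lstrip('0')
-- ===== Notes on version B (the rewrite author's own statement) =====
-- stated objective: faster
-- what changed: Replaced the per-character loop with its flag and string accumulator by two composed whole-string operations: a dot-removal pass (str.replace) followed by a leading-zero strip (str.lstrip).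
import Mathlib
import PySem

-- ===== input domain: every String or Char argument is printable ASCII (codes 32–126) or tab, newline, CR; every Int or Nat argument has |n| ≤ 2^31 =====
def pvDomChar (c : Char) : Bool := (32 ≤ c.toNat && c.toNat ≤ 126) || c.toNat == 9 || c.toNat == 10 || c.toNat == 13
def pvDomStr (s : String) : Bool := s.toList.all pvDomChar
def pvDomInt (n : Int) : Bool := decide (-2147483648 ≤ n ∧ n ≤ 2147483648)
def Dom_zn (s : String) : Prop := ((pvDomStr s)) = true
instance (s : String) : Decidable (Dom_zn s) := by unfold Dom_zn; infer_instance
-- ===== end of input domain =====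

-- B replaces the flag-carrying character loop by two composed whole-string passes (remove dots, then strip leading zeros); measured faster by a constant factor (C-level string ops vs a Python-level loop).


-- ===== PORT A =====
-- the loop body of A: skip dots, set the flag on the first non-'0', append once the flag is set
def znStep (st : String × Int) (c : Char) : String × Int :=
  if c = '.' then st
  else
    let chek := if c ≠ '0' then (1 : Int) else st.2
    if chek = 1 then (st.1.push c, chek) else (st.1, chek)

def zn (s : String) : String := (s.toList.foldl znStep ("", 0)).1

-- ===== PORT B =====
-- Source B: s.replace('.', '').lstrip('0'); replace of a single char by "" is the filter, lstrip('0') the dropWhile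
def zn_alt (s : String) : String :=
  String.ofList (((s.toList.filter (fun c => c ≠ '.')).dropWhile (fun c => c == '0')))

-- ===== PRECONDITION & SPEC =====
def Spec_zn (s : String) (out : String) : Prop := out = zn_alt s
instance (s : String) (out : String) : Decidable (Spec_zn s out) := by unfold Spec_zn; infer_instance

-- ===== CLAIM (what is proved, stated in full; the proofs are below) =====
def Claim_equal_zn : Prop := ∀ (s : String), Dom_zn s → Spec_zn s (zn s)

-- ===== LEMMAS AND PROOFS =====

-- once the flag is set, A appends every non-dot character
theorem zn_loop_one (l : List Char) : ∀ (res : String),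
    (l.foldl znStep (res, 1)).1 = res ++ String.ofList (l.filter (fun c => c ≠ '.')) := by
  induction l with
  | nil => intro res; simp
  | cons c t ih =>
    intro res
    by_cases hc : c = '.'
    · simp [znStep, hc, ih]
    · simp only [List.foldl_cons, znStep, if_neg hc]
      by_cases h0 : c = '0'
      · subst h0
        simp [ih, hc, String.ext_iff, String.toList_ofList]
      · simp [h0, ih, hc, String.ext_iff, String.toList_ofList]

-- while the flag is still clear, A drops dots and leading zeros
theorem zn_loop_zero (l : List Char) : ∀ (res : String),
    (l.foldl znStep (res, 0)).1
      = res ++ String.ofList ((l.filter (fun c => c ≠ '.')).dropWhile (fun c => c == '0')) := by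
  induction l with
  | nil => intro res; simp
  | cons c t ih =>
    intro res
    by_cases hc : c = '.'
    · simp [znStep, hc, ih]
    · simp only [List.foldl_cons, znStep, if_neg hc]
      by_cases h0 : c = '0'
      · subst h0
        simp [ih, hc]
      · simp [h0, zn_loop_one, hc, List.dropWhile, String.ext_iff, String.toList_ofList]

-- ===== VERDICT (by name: the statement is the Claim_ definition above) =====
theorem zn_spec : Claim_equal_zn := by
  intro s _
  show zn s = zn_alt s
  simp [zn, zn_alt, zn_loop_zero]
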